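-- pv_equiv track=rewrite | github.com/xxbidiao/GenerationMania | scripts/data_utils.py | normalize3_array
-- ===== SOURCE A (Python) =====
-- def normalize3_array(v):
--     max_index = -1
--     max_value = -1
--     max2_index = -1
--     max2_value = -1
--     for index,value in enumerate(v):
--         if index%2==1:
--             continue #skip all nonplayables
--         if value > max_value:
--             max2_value = max_value
--             max2_index = max_index
--             max_value = value
--             max_index = index
--         elif value > max2_value:
--             max2_index = index
--             max2_value = value
--     result = [0]*len(v)
--     if max_index >= 0:
--         result[max_index] = 1
--     if max2_index >= 0:
--         result[max2_index+1] = 1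
--         #pass
--     return result
-- ===== SOURCE B (Python) =====
-- def normalize3_array(v):
--     result = [0] * len(v)
--     evens = [(i, val) for i, val in enumerate(v) if i % 2 == 0 and val > -1]
--     if evens:
--         i1 = max(evens, key=lambda p: p[1])[0]
--         result[i1] = 1
--         rest = [p for p in evens if p[0] != i1]
--         if rest:
--             i2 = max(rest, key=lambda p: p[1])[0]
--             result[i2 + 1] = 1
--     return result
-- ===== Notes on version B (the rewrite author's own statement) =====
-- stated objective: simpler
-- what changed: A's single streaming pass with a four-variable top-two state machine is replaced by a candidate comprehension over even indices with value > -1 followed by two first-argmax selections (max with key, then max over the remaining candidates).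
import Mathlib
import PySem

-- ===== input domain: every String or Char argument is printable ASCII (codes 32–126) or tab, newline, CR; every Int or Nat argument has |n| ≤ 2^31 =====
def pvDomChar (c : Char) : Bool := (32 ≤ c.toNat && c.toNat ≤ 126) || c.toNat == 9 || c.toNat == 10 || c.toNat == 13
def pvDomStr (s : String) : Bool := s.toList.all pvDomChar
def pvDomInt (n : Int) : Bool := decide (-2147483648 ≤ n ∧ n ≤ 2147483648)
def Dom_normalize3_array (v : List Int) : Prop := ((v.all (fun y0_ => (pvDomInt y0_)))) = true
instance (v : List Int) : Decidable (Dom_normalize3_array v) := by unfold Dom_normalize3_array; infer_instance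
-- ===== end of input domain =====

-- B replaces A's single-pass two-maxima state machine by a candidate comprehension and
-- two first-argmax selections (simpler decomposition, same cost); return value only.

-- ===== PORT A =====
-- one iteration of A's loop: state = (max_index, max_value, max2_index, max2_value), p = (index, value)
def stepA (st : Int × Int × Int × Int) (p : Int × Int) : Int × Int × Int × Int :=
  if p.1 % 2 = 1 then st
  else if p.2 > st.2.1 then (p.1, p.2, st.1, st.2.1)
  else if p.2 > st.2.2.2 then (st.1, st.2.1, p.1, p.2)
  else st

def normalize3_array (v : List Int) : List Int :=
  let st := (PySem.List.enumerate v).foldl stepA (-1, -1, -1, -1)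
  let result := List.replicate v.length (0 : Int)
  let result := if st.1 ≥ 0 then result.set st.1.toNat 1 else result
  if st.2.2.1 ≥ 0 then result.set (st.2.2.1 + 1).toNat 1 else result

-- ===== PORT B =====
def normalize3_array_alt (v : List Int) : List Int :=
  let result := List.replicate v.length (0 : Int)
  let evens := (PySem.List.enumerate v).filter (fun p => p.1 % 2 == 0 && decide (p.2 > -1))
  match PySem.List.max? evens (fun p => p.2) with
  | none => result
  | some b1 =>
    let result := result.set b1.1.toNat 1
    let rest := evens.filter (fun p => p.1 != b1.1)
    match PySem.List.max? rest (fun p => p.2) with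
    | none => result
    | some b2 => result.set (b2.1 + 1).toNat 1

-- ===== PRECONDITION & SPEC =====
-- Pre_ excludes exactly the inputs on which Python A raises IndexError (max2_index+1 = len(v)):
-- odd-length lists whose last value is > -1 and beats all but exactly one earlier even-index value.
-- B raises IndexError on the same inputs.
def Pre_normalize3_array (v : List Int) : Prop :=
  ¬ (v.length % 2 = 1 ∧ v.getD (v.length - 1) 0 > -1 ∧
     ((List.range (v.length - 1)).filter
        (fun j => j % 2 == 0 && decide (v.getD j 0 ≥ v.getD (v.length - 1) 0))).length = 1)
instance (v : List Int) : Decidable (Pre_normalize3_array v) := by unfold Pre_normalize3_array; infer_instance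
def pvWitness_normalize3_array : List Int := [3, 1, 2, 1]

def Spec_normalize3_array (v : List Int) (out : List Int) : Prop := out = normalize3_array_alt v
instance (v : List Int) (out : List Int) : Decidable (Spec_normalize3_array v out) := by unfold Spec_normalize3_array; infer_instance

-- ===== CLAIM (what is proved, stated in full; the proofs are below) =====
def Claim_equal_normalize3_array : Prop := ∀ (v : List Int), Dom_normalize3_array v → Pre_normalize3_array v → Spec_normalize3_array v (normalize3_array v)

-- ===== LEMMAS AND PROOFS =====

-- pack B's two selections into A's state tuple
def pvPack : Option (Int × Int) → Option (Int × Int) → Int × Int × Int × Int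
  | none, _ => (-1, -1, -1, -1)
  | some b1, none => (b1.1, b1.2, -1, -1)
  | some b1, some b2 => (b1.1, b1.2, b2.1, b2.2)

def pvCond (p : Int × Int) : Bool := p.1 % 2 == 0 && decide (p.2 > -1)

def pvSecond (l : List (Int × Int)) : Option (Int × Int) :=
  match PySem.List.max? l (fun p => p.2) with
  | none => none
  | some b1 => PySem.List.max? (l.filter (fun p => p.1 != b1.1)) (fun p => p.2)

theorem stepA_even (st : Int × Int × Int × Int) (x : Int × Int) (hodd : ¬ x.1 % 2 = 1) :
    stepA st x = if x.2 > st.2.1 then (x.1, x.2, st.1, st.2.1)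
      else if x.2 > st.2.2.2 then (st.1, st.2.1, x.1, x.2) else st := by
  unfold stepA; rw [if_neg hodd]

-- max_value and max2_value never drop below -1
theorem pv_state_ge (l : List (Int × Int)) (st : Int × Int × Int × Int)
    (h1 : -1 ≤ st.2.1) (h2 : -1 ≤ st.2.2.2) :
    -1 ≤ (l.foldl stepA st).2.1 ∧ -1 ≤ (l.foldl stepA st).2.2.2 := by
  induction l generalizing st with
  | nil => exact ⟨h1, h2⟩
  | cons p t ih =>
    simp only [List.foldl_cons]
    apply ih <;> (unfold stepA; split_ifs <;> simp_all <;> omega)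

theorem pv_main (l : List (Int × Int)) (hpw : l.Pairwise (fun p q => p.1 < q.1)) :
    l.foldl stepA (-1, -1, -1, -1) =
      pvPack (PySem.List.max? (l.filter pvCond) (fun p => p.2)) (pvSecond (l.filter pvCond)) := by
  induction l using List.reverseRecOn with
  | nil => simp [PySem.List.max?, pvPack, pvSecond]
  | append_singleton t x ih =>
    have hpwt : t.Pairwise (fun p q => p.1 < q.1) := (List.pairwise_append.mp hpw).1
    have hlt : ∀ p ∈ t, p.1 < x.1 := by
      intro p hp
      exact (List.pairwise_append.mp hpw).2.2 p hp x (by simp)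
    have hltf : ∀ p ∈ t.filter pvCond, p.1 < x.1 := fun p hp => hlt p (List.mem_of_mem_filter hp)
    have hfilt : (t.filter pvCond).filter (fun p => p.1 != x.1) = t.filter pvCond := by
      apply List.filter_eq_self.mpr
      intro p hp
      have := hltf p hp
      simp; omega
    rw [List.foldl_append, List.filter_append, ih hpwt]
    simp only [List.foldl_cons, List.foldl_nil]
    by_cases hc : pvCond x
    · -- x is a candidate: even index, value > -1
      have hx2 : x.2 > -1 := by
        unfold pvCond at hc; simp at hc; exact hc.2
      have hxodd : ¬ (x.1 % 2 = 1) := by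
        unfold pvCond at hc; simp at hc; omega
      have hfx0 : List.filter pvCond [x] = [x] := by simp [hc]
      rw [hfx0]
      -- snoc step for max?
      have hmaxsnoc : ∀ (m : List (Int × Int)),
          PySem.List.max? (m ++ [x]) (fun p => p.2) =
            (match PySem.List.max? m (fun p => p.2) with
             | none => some x
             | some m => if m.2 < x.2 then some x else some m) := by
        intro m
        cases h : PySem.List.max? m (fun p => p.2) with
        | none =>
          have hm : m = [] := (PySem.List.max?_eq_none_iff _ _).mp h
          subst hm; rfl
        | some b =>
          unfold PySem.List.max? at h ⊢
          rw [List.foldl_append, h]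
          simp only [List.foldl_cons, List.foldl_nil]
      cases h1 : PySem.List.max? (t.filter pvCond) (fun p => p.2) with
      | none =>
        have ht0 : t.filter pvCond = [] := (PySem.List.max?_eq_none_iff _ _).mp h1
        rw [ht0]
        simp [pvPack, pvSecond, stepA, hxodd, hx2, PySem.List.max?]
      | some b1 =>
        have hb1t : b1 ∈ t.filter pvCond := PySem.List.max?_mem h1
        have hb1max : ∀ y ∈ t.filter pvCond, y.2 ≤ b1.2 := by
          intro y hy; exact PySem.List.max?_isMax h1 y hy
        have hb1lt : b1.1 < x.1 := hltf b1 hb1t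
        by_cases hgt : x.2 > b1.2
        · -- x becomes the new maximum, b1 becomes second
          have : PySem.List.max? (t.filter pvCond ++ [x]) (fun p => p.2) = some x := by
            rw [hmaxsnoc, h1]; simp [hgt]
          have hfx : (t.filter pvCond ++ [x]).filter (fun p => p.1 != x.1) = t.filter pvCond := by
            rw [List.filter_append]
            have h0 : List.filter (fun p => p.1 != x.1) [x] = [] := by simp
            rw [h0, List.append_nil]; exact hfilt
          have hsec : pvSecond (t.filter pvCond ++ [x]) = some b1 := by
            unfold pvSecond
            rw [this]
            show (PySem.List.max? ((t.filter pvCond ++ [x]).filter (fun p => p.1 != x.1)) (fun p => p.2)) = some b1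
            rw [hfx, h1]
          rw [this, hsec]
          have hsecIH : pvSecond (t.filter pvCond) = PySem.List.max? ((t.filter pvCond).filter (fun p => p.1 != b1.1)) (fun p => p.2) := by
            unfold pvSecond; rw [h1]
          rw [hsecIH]
          clear hsec
          cases h2 : PySem.List.max? ((t.filter pvCond).filter (fun p => p.1 != b1.1)) (fun p => p.2) with
          | none => rw [stepA_even _ _ hxodd]; simp [pvPack, hgt]
          | some b2 => rw [stepA_even _ _ hxodd]; simp [pvPack, hgt]
        · -- b1 stays the maximum
          have hmax' : PySem.List.max? (t.filter pvCond ++ [x]) (fun p => p.2) = some b1 := by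
            rw [hmaxsnoc, h1]; simp; omega
          have hxne : (x.1 != b1.1) = true := by simp; omega
          have hfx : (t.filter pvCond ++ [x]).filter (fun p => p.1 != b1.1) =
              (t.filter pvCond).filter (fun p => p.1 != b1.1) ++ [x] := by
            rw [List.filter_append]; simp [hxne]
          have hsec : pvSecond (t.filter pvCond ++ [x]) =
              PySem.List.max? ((t.filter pvCond).filter (fun p => p.1 != b1.1) ++ [x]) (fun p => p.2) := by
            unfold pvSecond
            rw [hmax']
            show (PySem.List.max? ((t.filter pvCond ++ [x]).filter (fun p => p.1 != b1.1)) (fun p => p.2)) = _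
            rw [hfx]
          have hsecIH : pvSecond (t.filter pvCond) = PySem.List.max? ((t.filter pvCond).filter (fun p => p.1 != b1.1)) (fun p => p.2) := by
            unfold pvSecond; rw [h1]
          rw [hmax', hsec, hmaxsnoc, hsecIH]
          cases h2 : PySem.List.max? ((t.filter pvCond).filter (fun p => p.1 != b1.1)) (fun p => p.2) with
          | none =>
            rw [stepA_even _ _ hxodd]
            simp [pvPack, hgt, hx2]
          | some b2 =>
            by_cases hgt2 : x.2 > b2.2
            · rw [stepA_even _ _ hxodd]
              simp only [pvPack]
              rw [if_neg (by simpa using hgt), if_pos (by simpa using hgt2), if_pos (by omega)]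
            · rw [stepA_even _ _ hxodd]
              simp only [pvPack]
              rw [if_neg (by simpa using hgt), if_neg (by simpa using hgt2), if_neg (by omega)]
    · -- x is skipped (odd index or value ≤ -1): state and candidates unchanged
      have hstep : ∀ st, -1 ≤ st.2.1 → -1 ≤ st.2.2.2 → stepA st x = st := by
        intro st h1 h2
        unfold stepA
        unfold pvCond at hc
        simp at hc
        split_ifs with hA hB hC
        · rfl
        · exfalso
          have hdvd : (2:Int) ∣ x.1 := by omega
          have := hc hdvd
          omega
        · exfalso
          have hdvd : (2:Int) ∣ x.1 := by omega
          have := hc hdvd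
          omega
        · rfl
      have hge := pv_state_ge t (-1, -1, -1, -1) (by norm_num) (by norm_num)
      rw [ih hpwt] at hge
      have hfx0 : List.filter pvCond [x] = [] := by simp [hc]
      rw [hfx0]
      simp only [List.append_nil]
      exact hstep _ hge.1 hge.2

theorem pv_idx_nonneg (v : List Int) (p : Int × Int)
    (hp : p ∈ (PySem.List.enumerate v).filter pvCond) : 0 ≤ p.1 := by
  have := List.mem_of_mem_filter hp
  rcases (PySem.List.mem_enumerate_iff _ _ _).mp this with ⟨k, hk, rfl⟩
  simp

-- ===== VERDICT (by name: the statement is the Claim_ definition above) =====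
theorem normalize3_array_spec : Claim_equal_normalize3_array := by
  intro v _ _
  show normalize3_array v = normalize3_array_alt v
  have hpw := PySem.List.pairwise_lt_enumerate v 0
  unfold normalize3_array normalize3_array_alt
  dsimp only
  rw [pv_main (PySem.List.enumerate v) hpw]
  have hfc : (PySem.List.enumerate v).filter (fun p => p.1 % 2 == 0 && decide (p.2 > -1)) =
      (PySem.List.enumerate v).filter pvCond := rfl
  rw [hfc]
  cases h1 : PySem.List.max? ((PySem.List.enumerate v).filter pvCond) (fun p => p.2) with
  | none =>
    have hs : pvSecond ((PySem.List.enumerate v).filter pvCond) = none := by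
      unfold pvSecond; rw [h1]
    rw [hs]
    simp only [pvPack]
    norm_num
  | some b1 =>
    have hb1 : 0 ≤ b1.1 := pv_idx_nonneg v b1 (PySem.List.max?_mem h1)
    have hs : pvSecond ((PySem.List.enumerate v).filter pvCond) =
        PySem.List.max? (((PySem.List.enumerate v).filter pvCond).filter (fun p => p.1 != b1.1)) (fun p => p.2) := by
      unfold pvSecond; rw [h1]
    rw [hs]
    cases h2 : PySem.List.max? (((PySem.List.enumerate v).filter pvCond).filter (fun p => p.1 != b1.1)) (fun p => p.2) with
    | none =>
      simp only [pvPack]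
      rw [h2, if_neg (by norm_num), if_pos (show b1.1 ≥ 0 by omega)]
    | some b2 =>
      have hb2 : 0 ≤ b2.1 :=
        pv_idx_nonneg v b2 (List.mem_of_mem_filter (PySem.List.max?_mem h2))
      simp only [pvPack]
      rw [h2, if_pos (show b2.1 ≥ 0 by omega), if_pos (show b1.1 ≥ 0 by omega)]
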